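-- pv_equiv track=rewrite | github.com/pgarrett-scripps/peptacular | src/peptacular/peptide.py | create_modified_peptide
-- ===== SOURCE A (Python) =====
-- from typing import Dict
--
-- def create_modified_peptide(unmodified_sequence: str, modifications: Dict[int, str]) -> str:
--     """
--     Creates a modified peptide sequence from an unmodified peptide sequence and a dictionary of modifications.
--
--     The modifications are specified as a dictionary where the keys are the indices of the modified amino acids
--     in the peptide sequence, and the values are the modifications to apply at those indices. The modifications are
--     added to the peptide sequence in descending order of index, so that the indices remain valid after each
--     modification is applied.
--     """
--
--     modified_sequence = []
--     prev_index = 0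
--
--     # Sort the modifications by index in descending order
--     for i, mod in sorted(modifications.items()):
--
--         if i < 0 or i >= len(unmodified_sequence):
--             raise ValueError(f'Index of modification: {i} is invalid for peptide sequence: {unmodified_sequence}')
--
--         # Insert the modification into the modified peptide sequence
--         modified_sequence.append(unmodified_sequence[prev_index: i + 1])
--         modified_sequence.append(f"({mod})")
--         prev_index = i + 1
--
--     modified_sequence.append(unmodified_sequence[prev_index:])
--     return ''.join(modified_sequence)
-- ===== SOURCE B (Python) =====
-- def create_modified_peptide(unmodified_sequence: str, modifications: dict) -> str:
--     """Single pass over the sequence with dict lookups; no sorting of the modifications."""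
--     n = len(unmodified_sequence)
--     bad = [i for i in modifications if i < 0 or i >= n]
--     if bad:
--         i = min(bad)
--         raise ValueError(f'Index of modification: {i} is invalid for peptide sequence: {unmodified_sequence}')
--     parts = []
--     for i, ch in enumerate(unmodified_sequence):
--         parts.append(ch)
--         if i in modifications:
--             parts.append(f"({modifications[i]})")
--     return ''.join(parts)
-- ===== Notes on version B (the rewrite author's own statement) =====
-- stated objective: alternative
-- what changed: B drops the sort entirely: it validates the indices up front and then makes one pass over the sequence with enumerate, appending '(mod)' after a character exactly when its position is a key of the dict, instead of sorting the modifications and stitching slices between successive modified positions.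
import Mathlib
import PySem

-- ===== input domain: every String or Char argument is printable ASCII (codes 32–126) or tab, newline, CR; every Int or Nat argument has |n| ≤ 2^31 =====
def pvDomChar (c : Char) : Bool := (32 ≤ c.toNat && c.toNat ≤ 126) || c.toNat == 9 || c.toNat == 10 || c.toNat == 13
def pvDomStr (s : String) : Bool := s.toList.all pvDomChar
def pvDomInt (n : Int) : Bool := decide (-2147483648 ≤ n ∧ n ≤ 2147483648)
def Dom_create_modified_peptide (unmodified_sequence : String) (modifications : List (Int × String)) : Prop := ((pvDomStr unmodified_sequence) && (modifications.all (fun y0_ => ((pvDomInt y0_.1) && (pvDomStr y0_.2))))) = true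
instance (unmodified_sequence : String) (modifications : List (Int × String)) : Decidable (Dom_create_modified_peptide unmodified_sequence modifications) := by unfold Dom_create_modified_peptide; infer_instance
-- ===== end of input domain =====

-- ===== PORT A =====
-- B replaces A's sort-and-slice construction with one validated pass over the sequence (objective: alternative).
-- A-side loop: `for i, mod in sorted(modifications.items()): …` with the two appends and prev_index;
-- the invalid-index branch is where Python raises ValueError (excluded by Pre_, port returns the
-- accumulator there).  `sorted(modifications.items())` compares (index, mod) tuples; dict keys are
-- unique, so sorting by the index alone produces the exact same order (keys are Nodup under Pre_).
def cmpA_loop (cs : List Char) (ms : List (Int × String)) (acc : List (List Char)) (prev : Int) : List (List Char) :=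
  match ms with
  | [] => acc ++ [PySem.List.slice cs (some prev) none]
  | (i, m) :: rest =>
    if i < 0 ∨ (cs.length : Int) ≤ i then acc
    else cmpA_loop cs rest
      (acc ++ [PySem.List.slice cs (some prev) (some (i + 1)), '(' :: m.toList ++ [')']]) (i + 1)

def create_modified_peptide (unmodified_sequence : String) (modifications : List (Int × String)) : String :=
  String.ofList (PySem.Chars.join []
    (cmpA_loop unmodified_sequence.toList
      (PySem.List.sorted modifications (fun p => p.1)) [] 0))

-- ===== PORT B =====
-- per-character emission: the char itself, plus "(mod)" when its index is a key of the dict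
def cmpB_emit (d : PySem.Dict Int String) (p : Int × Char) : List (List Char) :=
  match d.get? p.1 with
  | some m => [[p.2], '(' :: m.toList ++ [')']]
  | none => [[p.2]]

def create_modified_peptide_alt (unmodified_sequence : String) (modifications : List (Int × String)) : String :=
  let cs := unmodified_sequence.toList
  -- `bad = [i for i in modifications if i < 0 or i >= n]; if bad: raise` — Pre_ excludes that raise
  if modifications.any (fun p => decide (p.1 < 0) || decide ((cs.length : Int) ≤ p.1)) then ""
  else
    String.ofList (PySem.Chars.join []
      ((PySem.List.enumerate cs 0).foldl
        (fun acc p => acc ++ cmpB_emit (PySem.Dict.mk modifications) p) []))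

-- ===== PRECONDITION & SPEC =====
-- Pre_ excludes (a) modification indices outside [0, len), on which both A and B raise ValueError,
-- and (b) association lists with duplicate keys, which do not correspond to any Python dict
-- (the dict -> assoc-list convention always yields distinct keys).
def Pre_create_modified_peptide (unmodified_sequence : String) (modifications : List (Int × String)) : Prop :=
  (modifications.map (fun p => p.1)).Nodup ∧
  ∀ p ∈ modifications, 0 ≤ p.1 ∧ p.1 < (unmodified_sequence.toList.length : Int)

instance (unmodified_sequence : String) (modifications : List (Int × String)) : Decidable (Pre_create_modified_peptide unmodified_sequence modifications) := by unfold Pre_create_modified_peptide; infer_instance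

def pvWitness_create_modified_peptide : String × (List (Int × String)) :=
  ("PEPTIDE", [(6, "1"), (0, "ox")])

def Spec_create_modified_peptide (unmodified_sequence : String) (modifications : List (Int × String)) (out : String) : Prop := out = create_modified_peptide_alt unmodified_sequence modifications
instance (unmodified_sequence : String) (modifications : List (Int × String)) (out : String) : Decidable (Spec_create_modified_peptide unmodified_sequence modifications out) := by unfold Spec_create_modified_peptide; infer_instance

-- ===== CLAIM (what is proved, stated in full; the proofs are below) =====
def Claim_equal_create_modified_peptide : Prop := ∀ (unmodified_sequence : String) (modifications : List (Int × String)), Dom_create_modified_peptide unmodified_sequence modifications → Pre_create_modified_peptide unmodified_sequence modifications → Spec_create_modified_peptide unmodified_sequence modifications (create_modified_peptide unmodified_sequence modifications)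

-- ===== LEMMAS AND PROOFS =====

-- join with empty separator is flatten
lemma join_nil_flatten (parts : List (List Char)) : PySem.Chars.join [] parts = parts.flatten := by
  match parts with
  | [] => simp [PySem.Chars.join_nil]
  | [a] => simp [PySem.Chars.join_singleton]
  | a :: b :: rest =>
    rw [PySem.Chars.join_cons_cons, join_nil_flatten (b :: rest)]
    simp

-- lookup in a dict built from a permuted assoc list with distinct keys is unchanged
lemma get?_mk_perm (l l' : List (Int × String)) (hp : l.Perm l')
    (hnd : (l.map Prod.fst).Nodup) (k : Int) :
    (PySem.Dict.mk l).get? k = (PySem.Dict.mk l').get? k := by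
  have hnd' : (l'.map Prod.fst).Nodup := ((hp.map Prod.fst).nodup_iff).mp hnd
  cases h : (PySem.Dict.mk l).get? k with
  | some v =>
    have hm : (k, v) ∈ l := by
      have := PySem.Dict.mem_items_of_get?_eq_some (PySem.Dict.mk l) h
      simpa using this
    exact (PySem.Dict.get?_of_mem_items _ (hp.mem_iff.mp hm)
      (by simpa [PySem.Dict.keys_mk] using hnd')).symm
  | none =>
    have hk : k ∉ l.map Prod.fst := by
      simpa [PySem.Dict.keys_mk] using (PySem.Dict.get?_eq_none_iff_not_mem_keys (PySem.Dict.mk l) k).mp h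
    exact ((PySem.Dict.get?_eq_none_iff_not_mem_keys (PySem.Dict.mk l') k).mpr
      (by simpa [PySem.Dict.keys_mk] using fun hm => hk ((hp.map Prod.fst).mem_iff.mpr hm))).symm

-- B's expansion of a character segment starting at index j
def Bexp (d : PySem.Dict Int String) (xs : List Char) (j : Int) : List Char :=
  ((PySem.List.enumerate xs j).flatMap (cmpB_emit d)).flatten

lemma Bexp_nil (d : PySem.Dict Int String) (j : Int) : Bexp d [] j = [] := by
  simp [Bexp, PySem.List.enumerate]

lemma Bexp_cons (d : PySem.Dict Int String) (c : Char) (xs : List Char) (j : Int) :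
    Bexp d (c :: xs) j = (cmpB_emit d (j, c)).flatten ++ Bexp d xs (j + 1) := by
  simp [Bexp, PySem.List.enumerate_cons]

lemma Bexp_append (d : PySem.Dict Int String) (xs ys : List Char) (j : Int) :
    Bexp d (xs ++ ys) j = Bexp d xs j ++ Bexp d ys (j + xs.length) := by
  simp [Bexp, PySem.List.enumerate_append]

-- a segment whose indices carry no modification expands to itself
lemma Bexp_none (d : PySem.Dict Int String) (xs : List Char) :
    ∀ j : Int, (∀ i : Int, j ≤ i → i < j + xs.length → d.get? i = none) → Bexp d xs j = xs := by
  induction xs with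
  | nil => intro j _; exact Bexp_nil d j
  | cons c xs ih =>
    intro j h
    rw [Bexp_cons]
    have hlc : (((c :: xs).length : Nat) : Int) = (xs.length : Int) + 1 := by simp
    have h0 : d.get? j = none := h j le_rfl (by rw [hlc]; omega)
    rw [ih (j + 1) (fun i h1 h2 => h i (by omega) (by rw [hlc]; omega))]
    simp [cmpB_emit, h0]

-- main invariant: A's sorted-slice loop from position p equals B's per-character expansion from p
lemma A_loop_eq_Bexp (cs : List Char) (d : PySem.Dict Int String) :
    ∀ (ms : List (Int × String)) (p : Nat) (acc : List (List Char)),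
      p ≤ cs.length →
      ms.Pairwise (fun a b => a.1 < b.1) →
      (∀ q ∈ ms, (p : Int) ≤ q.1 ∧ q.1 < (cs.length : Int)) →
      (∀ i : Int, (p : Int) ≤ i → d.get? i = (PySem.Dict.mk ms).get? i) →
      (cmpA_loop cs ms acc (p : Int)).flatten = acc.flatten ++ Bexp d (cs.drop p) (p : Int) := by
  intro ms
  induction ms with
  | nil =>
    intro p acc _ _ _ hget
    have hnone : ∀ i : Int, (p : Int) ≤ i → d.get? i = none := by
      intro i hi
      rw [hget i hi]
      exact (PySem.Dict.get?_eq_none_iff_not_mem_keys _ _).mpr (by simp [PySem.Dict.keys_mk])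
    rw [Bexp_none d _ _ (fun i h1 _ => hnone i h1)]
    have hsl : PySem.List.slice cs (some (p : Int)) none = cs.drop p := by
      rw [PySem.List.slice_from cs (show (0:Int) ≤ (p:Int) by positivity)]
      simp
    simp [cmpA_loop, hsl]
  | cons q rest ih =>
    intro p acc hp hpw hbnd hget
    obtain ⟨k, m⟩ := q
    have hk0 : (p : Int) ≤ k := (hbnd _ (List.mem_cons_self ..)).1
    have hkn : k < (cs.length : Int) := (hbnd _ (List.mem_cons_self ..)).2
    have hkk : ((k.toNat : Nat) : Int) = k := Int.toNat_of_nonneg (by omega)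
    have hklt : k.toNat < cs.length := by omega
    have hkp : p ≤ k.toNat := by omega
    have hrest_lt : ∀ q' ∈ rest, k < q'.1 := fun q' hq' => (List.pairwise_cons.mp hpw).1 q' hq'
    -- unfold one step of A's loop; the raise branch is impossible
    rw [show cmpA_loop cs ((k, m) :: rest) acc (p : Int)
        = cmpA_loop cs rest
            (acc ++ [PySem.List.slice cs (some (p : Int)) (some (k + 1)), '(' :: m.toList ++ [')']])
            (k + 1) by rw [cmpA_loop]; rw [if_neg (by omega)]]
    have hstep := ih (k.toNat + 1)
      (acc ++ [PySem.List.slice cs (some (p : Int)) (some (k + 1)), '(' :: m.toList ++ [')']])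
      (by omega) (List.pairwise_cons.mp hpw).2
      (fun q' hq' => ⟨by have := hrest_lt q' hq'; push_cast; omega, (hbnd q' (List.mem_cons_of_mem _ hq')).2⟩)
      (fun i hi => by
        rw [hget i (by push_cast at hi; omega), PySem.Dict.get?_mk_cons]
        rw [if_neg (by simp; push_cast at hi; omega)])
    rw [show ((k.toNat + 1 : Nat) : Int) = k + 1 by push_cast; omega] at hstep
    rw [hstep]
    -- now compute B's side: split the segment [p, …) at k
    have hsplit : cs.drop p
        = (cs.drop p).take (k.toNat - p) ++ (cs[k.toNat] :: cs.drop (k.toNat + 1)) := by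
      have h1 : (cs.drop p).drop (k.toNat - p) = cs[k.toNat] :: cs.drop (k.toNat + 1) := by
        rw [List.drop_drop, show p + (k.toNat - p) = k.toNat by omega,
          List.drop_eq_getElem_cons hklt]
      conv_lhs => rw [← List.take_append_drop (k.toNat - p) (cs.drop p)]
      rw [h1]
    rw [hsplit, Bexp_append, Bexp_cons]
    have hlen : ((cs.drop p).take (k.toNat - p)).length = k.toNat - p := by
      simp; omega
    have hseg : Bexp d ((cs.drop p).take (k.toNat - p)) (p : Int)
        = (cs.drop p).take (k.toNat - p) := by
      apply Bexp_none
      intro i h1 h2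
      rw [hlen] at h2
      rw [hget i h1]
      apply (PySem.Dict.get?_eq_none_iff_not_mem_keys _ _).mpr
      simp only [PySem.Dict.keys_mk, List.map_cons, List.mem_cons, List.mem_map]
      push Not
      refine ⟨by omega, ?_⟩
      rintro q' hq' rfl
      have := hrest_lt q' hq'
      omega
    have hatk : d.get? k = some m := by
      rw [hget k hk0, PySem.Dict.get?_mk_cons, if_pos (by simp)]
    -- A's slice [p, k+1) is the none-segment plus the character at k
    have hslice : PySem.List.slice cs (some (p : Int)) (some (k + 1))
        = (cs.drop p).take (k.toNat - p) ++ [cs[k.toNat]] := by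
      rw [show (k + 1 : Int) = ((k.toNat + 1 : Nat) : Int) by push_cast; omega,
        PySem.List.slice_natCast]
      rw [show k.toNat + 1 - p = (k.toNat - p) + 1 by omega]
      rw [List.take_add_one]
      congr 1
      have : (cs.drop p)[k.toNat - p]? = some cs[k.toNat] := by
        rw [List.getElem?_drop]
        rw [show p + (k.toNat - p) = k.toNat by omega]
        exact List.getElem?_eq_getElem hklt
      simp [this]
    rw [hseg, hlen, hslice]
    rw [show (p : Int) + ((k.toNat : Nat) - p : Nat) = k by omega]
    simp [cmpB_emit, hatk]

-- ===== VERDICT (by name: the statement is the Claim_ definition above) =====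
theorem create_modified_peptide_spec : Claim_equal_create_modified_peptide := by
  intro s mods _ hpre
  unfold Spec_create_modified_peptide
  obtain ⟨hnd, hbnd⟩ := hpre
  set cs := s.toList with hcs
  set ms := PySem.List.sorted mods (fun p => p.1) with hms
  have hperm : ms.Perm mods := PySem.List.sorted_perm mods (fun p => p.1) false
  have hndms : (ms.map Prod.fst).Nodup := ((hperm.map Prod.fst).nodup_iff).mpr hnd
  have hpw : ms.Pairwise (fun a b => a.1 < b.1) := by
    have h1 : ms.Pairwise (fun a b => a.1 ≤ b.1) := PySem.List.sorted_pairwise mods (fun p => p.1)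
    have h3 : ms.Pairwise (fun a b => a.1 ≠ b.1) := List.pairwise_map.mp hndms
    exact (h1.and h3).imp (fun h => lt_of_le_of_ne h.1 h.2)
  have hmain := A_loop_eq_Bexp cs (PySem.Dict.mk mods) ms 0 []
    (Nat.zero_le _) hpw
    (fun q hq => by
      have := hbnd q (hperm.mem_iff.mp hq)
      exact ⟨by push_cast; omega, this.2⟩)
    (fun i _ => get?_mk_perm mods ms hperm.symm hnd i)
  simp only [Nat.cast_zero, List.drop_zero, List.flatten_nil, List.nil_append] at hmain
  have hany : mods.any (fun p => decide (p.1 < 0) || decide ((cs.length : Int) ≤ p.1)) = false := by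
    rw [List.any_eq_false]
    intro p hp
    have := hbnd p hp
    simp only [Bool.or_eq_true, decide_eq_true_eq, not_or]
    omega
  rw [create_modified_peptide, create_modified_peptide_alt]
  simp only [← hcs, ← hms, hany, if_neg Bool.false_ne_true]
  rw [PySem.List.foldl_append_eq_flatMap, List.nil_append]
  rw [join_nil_flatten, join_nil_flatten, hmain]
  rfl
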